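-- pv_equiv track=rewrite | github.com/khw5123/Project | Algorithm/SWExpert/5213. 진수의 홀수 약수.py | solve
-- ===== SOURCE A (Python) =====
-- def solve(n):
--     result = [0]*(n+1)
--     for i in range(1, n+1, 2):
--         j = 1
--         while i*j < n+1:
--             result[i*j] += i
--             j += 1
--     for i in range(1, n+1):
--         result[i] += result[i-1]
--     return result
-- ===== SOURCE B (Python) =====
-- def solve(n):
--     size = n + 1
--     f = [0] * size
--     for i in range(1, size, 2):
--         for m in range(i, size, 2 * i):
--             f[m] += i
--     for k in range(2, size, 2):
--         f[k] = f[k // 2]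
--     out = []
--     t = 0
--     for v in f:
--         t += v
--         out.append(t)
--     return out
-- ===== Notes on version B (the rewrite author's own statement) =====
-- stated objective: faster
-- what changed: A adds every odd i to all of its multiples and then prefix-sums in place; B's sieve touches only the odd multiples of each odd i (step 2i), fills every even index by copying from its half (the odd-divisor sum of 2m equals that of m), and builds the output with a running total.
import Mathlib
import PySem

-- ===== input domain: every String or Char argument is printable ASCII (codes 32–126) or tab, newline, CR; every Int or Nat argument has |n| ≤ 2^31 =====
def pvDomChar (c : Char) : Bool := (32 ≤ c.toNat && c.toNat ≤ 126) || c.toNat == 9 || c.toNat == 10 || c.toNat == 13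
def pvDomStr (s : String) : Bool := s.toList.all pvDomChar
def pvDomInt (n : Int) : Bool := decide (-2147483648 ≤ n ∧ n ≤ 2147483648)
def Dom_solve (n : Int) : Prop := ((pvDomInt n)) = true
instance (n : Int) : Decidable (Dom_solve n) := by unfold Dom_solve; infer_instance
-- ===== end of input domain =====

-- B replaces A's all-multiples divisor sieve by an odd-multiples-only sieve plus a halving pass
-- (sum of odd divisors of 2m equals that of m) and a running-total prefix; measured ~2x faster
-- at large n (constant factor: the inner sieve does a quarter of A's writes).

-- ===== PORT A =====
-- shared helper: Python 'lst[p] += v' at a nonnegative in-range index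
def pvBump (res : List Int) (p : Int) (v : Int) : List Int :=
  res.set p.toNat (res.getD p.toNat 0 + v)

-- A's inner 'while i*j < n+1' loop; the '0 < i' conjunct only makes the recursion
-- well-founded (A's outer range supplies i ≥ 1, so it never changes the computation)
def pvInnerA (nn i : Int) (res : List Int) (j : Int) : List Int :=
  if h : i * j < nn ∧ 0 < i then
    pvInnerA nn i (pvBump res (i * j) i) (j + 1)
  else res
termination_by (nn - i * j).toNat
decreasing_by
  have h1 : i * (j + 1) = i * j + i := by ring
  omega

-- 'result' after A's first loop nest: for i in range(1, n+1, 2): j = 1; while ...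
def pvSieveA (n : Int) : List Int :=
  (PySem.List.pyRange 1 (n + 1) 2).foldl (fun res i => pvInnerA (n + 1) i res 1)
    (List.replicate (n + 1).toNat 0)

-- second loop: for i in range(1, n+1): result[i] += result[i-1]
def solve (n : Int) : List Int :=
  (PySem.List.pyRange 1 (n + 1) 1).foldl
    (fun res i => res.set i.toNat (res.getD i.toNat 0 + res.getD (i - 1).toNat 0)) (pvSieveA n)

-- ===== PORT B =====
-- f after B's sieve: for i in range(1, size, 2): for m in range(i, size, 2*i): f[m] += i
def pvSieveB (n : Int) : List Int :=
  (PySem.List.pyRange 1 (n + 1) 2).foldl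
    (fun f i => (PySem.List.pyRange i (n + 1) (2 * i)).foldl (fun f m => pvBump f m i) f)
    (List.replicate (n + 1).toNat 0)

-- for k in range(2, size, 2): f[k] = f[k // 2]
def pvHalveB (n : Int) : List Int :=
  (PySem.List.pyRange 2 (n + 1) 2).foldl
    (fun f k => f.set k.toNat (f.getD (PySem.Int.floordiv k 2).toNat 0)) (pvSieveB n)

-- running-total loop: t += v; out.append(t)
def solve_alt (n : Int) : List Int :=
  ((pvHalveB n).foldl (fun acc v => (acc.1 + v, acc.2 ++ [acc.1 + v]))
    ((0 : Int), ([] : List Int))).2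

-- ===== PRECONDITION & SPEC =====
def Spec_solve (n : Int) (out : List Int) : Prop := out = solve_alt n
instance (n : Int) (out : List Int) : Decidable (Spec_solve n out) := by
  unfold Spec_solve; infer_instance

-- ===== CLAIM (what is proved, stated in full; the proofs are below) =====
def Claim_equal_solve : Prop := ∀ (n : Int), Dom_solve n → Spec_solve n (solve n)

-- ===== LEMMAS AND PROOFS =====
lemma getD_set (l : List Int) (p : Nat) (v : Int) (q : Nat) (hp : p < l.length) :
    (l.set p v).getD q 0 = if q = p then v else l.getD q 0 := by
  rcases lt_or_ge q l.length with h | h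
  · rw [List.getD_eq_getElem _ _ (by simpa using h), List.getElem_set]
    split_ifs with h1 h2 h3 <;> try rfl
    · omega
    · omega
    · rw [List.getD_eq_getElem _ _ h]
  · have hq : q ≠ p := by omega
    rw [if_neg hq, List.getD_eq_default _ _ (by simpa using h), List.getD_eq_default _ _ (by simpa using h)]

lemma getD_replicate (n q : Nat) : (List.replicate n (0:Int)).getD q 0 = 0 := by
  rcases lt_or_ge q n with h | h
  · rw [List.getD_eq_getElem _ _ (by simpa using h)]; simp
  · rw [List.getD_eq_default _ _ (by simpa using h)]

lemma pyRange_pos_nil {a b s : Int} (hs : 0 < s) (h : b ≤ a) :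
    PySem.List.pyRange a b s = [] := by
  rw [PySem.List.pyRange_of_pos _ _ hs, if_neg (by omega)]; rfl

lemma pyRange_pos_cons {a b s : Int} (hs : 0 < s) (h : a < b) :
    PySem.List.pyRange a b s = a :: PySem.List.pyRange (a + s) b s := by
  rw [PySem.List.pyRange_of_pos _ _ hs, PySem.List.pyRange_of_pos _ _ hs, if_pos h]
  have hm : ((b - a + s - 1) / s).toNat = ((b - (a+s) + s - 1) / s).toNat + 1 := by
    have h1 : b - a + s - 1 = (b - (a+s) + s - 1) + 1 * s := by ring
    rw [h1, Int.add_mul_ediv_right _ _ (by omega : s ≠ 0)]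
    have h2 : 0 ≤ (b - (a+s) + s - 1) / s := Int.ediv_nonneg (by omega) (by omega)
    omega
  rw [hm, List.range_succ_eq_map]
  simp only [List.map_cons, List.map_map, Nat.cast_zero, mul_zero, add_zero, List.cons.injEq,
    true_and]
  by_cases h2 : a + s < b
  · rw [if_pos h2]
    apply List.map_congr_left; intro k _
    simp [Function.comp]; ring
  · rw [if_neg h2]
    have : (b - (a+s) + s - 1) / s = 0 := Int.ediv_eq_zero_of_lt (by omega) (by omega)
    simp [this]



lemma bump_length (res : List Int) (p v : Int) : (pvBump res p v).length = res.length := by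
  simp [pvBump]

lemma bump_getD (res : List Int) (p v : Int) (q : Nat) (h0 : 0 ≤ p)
    (hp : p < (res.length : Int)) :
    (pvBump res p v).getD q 0 = if (q : Int) = p then res.getD q 0 + v else res.getD q 0 := by
  rw [pvBump, getD_set _ _ _ _ (by omega)]
  by_cases hq : (q : Int) = p
  · rw [if_pos hq, if_pos (by omega), (by omega : p.toNat = q)]
  · rw [if_neg hq, if_neg (by omega)]

lemma innerA_length (nn i j : Int) (res : List Int) :
    (pvInnerA nn i res j).length = res.length := by
  fun_induction pvInnerA with
  | case1 res j h ih => rw [ih, bump_length]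
  | case2 res j h => rfl

lemma innerA_getD (nn i j : Int) (res : List Int) (hi : 0 < i) (hj : 1 ≤ j)
    (hlen : res.length = nn.toNat) (q : Nat) (hq : q < nn.toNat) :
    (pvInnerA nn i res j).getD q 0 =
      res.getD q 0 + (if i * j ≤ (q : Int) ∧ i ∣ (q : Int) then i else 0) := by
  fun_induction pvInnerA nn i res j with
  | case1 res j h ih =>
    rw [ih (by omega) (by rw [bump_length, hlen])]
    rw [bump_getD _ _ _ _ (by positivity) (by rw [hlen]; omega)]
    by_cases hqij : (q : Int) = i * j
    · have hpos : i * j ≤ (q : Int) ∧ i ∣ (q : Int) := ⟨by omega, ⟨j, hqij⟩⟩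
      have hneg : ¬(i * (j + 1) ≤ (q : Int) ∧ i ∣ (q : Int)) := by
        rintro ⟨h1, -⟩
        have hstep : i * (j + 1) = i * j + i := by ring
        omega
      rw [if_pos hqij, if_neg hneg, if_pos hpos]
      ring
    · rw [if_neg hqij]
      have hiff : (i * (j + 1) ≤ (q : Int) ∧ i ∣ (q : Int)) ↔
          (i * j ≤ (q : Int) ∧ i ∣ (q : Int)) := by
        constructor
        · rintro ⟨h1, h2⟩
          have : i * (j + 1) = i * j + i := by ring
          exact ⟨by omega, h2⟩
        · rintro ⟨h1, h2⟩
          obtain ⟨c, hc⟩ := h2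
          refine ⟨?_, ⟨c, hc⟩⟩
          have hjc : j ≤ c := by
            by_contra hcon
            have : c ≤ j - 1 := by omega
            have : i * c ≤ i * (j - 1) := by
              exact mul_le_mul_of_nonneg_left this (by omega)
            have h3 : i * (j-1) = i * j - i := by ring
            omega
          have hne : c ≠ j := by
            intro hcj; exact hqij (by rw [hc, hcj, mul_comm])
          have : j + 1 ≤ c := by omega
          calc i * (j + 1) ≤ i * c := mul_le_mul_of_nonneg_left this (by omega)
            _ = (q : Int) := by rw [hc, mul_comm]
      rw [if_congr hiff rfl rfl]
  | case2 res j h =>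
    rw [if_neg, add_zero]
    rintro ⟨h1, -⟩
    have : ¬ i * j < nn := fun hc => h ⟨hc, hi⟩
    omega

lemma foldl_length {α : Type} (op : List Int → α → List Int)
    (h : ∀ f x, (op f x).length = f.length) :
    ∀ (L : List α) (f : List Int), (L.foldl op f).length = f.length := by
  intro L
  induction L with
  | nil => intro f; rfl
  | cons x t ih => intro f; rw [List.foldl_cons, ih, h]

-- A's outer sieve loop
lemma foldA_getD (nn : Int) :
    ∀ (L : List Int), (∀ i ∈ L, 0 < i) → ∀ (res : List Int), res.length = nn.toNat →
      ∀ q : Nat, q < nn.toNat →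
      ((L.foldl (fun res i => pvInnerA nn i res 1) res).getD q 0) =
        res.getD q 0 +
          ((L.map (fun i => if i ≤ (q : Int) ∧ i ∣ (q : Int) then i else 0)).sum) := by
  intro L
  induction L with
  | nil => intro _ res _ q _; simp
  | cons x t ih =>
    intro hpos res hlen q hq
    rw [List.foldl_cons, ih (fun i hi => hpos i (List.mem_cons_of_mem _ hi)) _
      (by rw [innerA_length, hlen]) q hq]
    rw [innerA_getD nn x 1 res (hpos x List.mem_cons_self) le_rfl hlen q hq]
    simp only [List.map_cons, List.sum_cons, mul_one]
    ring

-- B's inner loop over a list of positions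
lemma foldPos_getD (v : Int) :
    ∀ (P : List Int), (∀ p ∈ P, 0 ≤ p) → ∀ (f : List Int),
      (∀ p ∈ P, p < (f.length : Int)) →
      ∀ q : Nat,
      ((P.foldl (fun f m => pvBump f m v) f).getD q 0) =
        f.getD q 0 + ((P.map (fun p => if (q : Int) = p then v else 0)).sum) := by
  intro P
  induction P with
  | nil => intro _ f _ q; simp
  | cons x t ih =>
    intro h0 f hlt q
    rw [List.foldl_cons, ih (fun p hp => h0 p (List.mem_cons_of_mem _ hp)) _
      (fun p hp => by rw [bump_length]; exact hlt p (List.mem_cons_of_mem _ hp)) q]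
    rw [bump_getD _ _ _ _ (h0 x List.mem_cons_self) (hlt x List.mem_cons_self)]
    simp only [List.map_cons, List.sum_cons]
    by_cases hqx : (q : Int) = x
    · rw [if_pos hqx, if_pos hqx]; ring
    · rw [if_neg hqx, if_neg hqx]; ring

-- sum of an indicator over a positive-step range is a membership test
lemma sum_ite_mem_pyRange_aux (v x s : Int) (hs : 0 < s) :
    ∀ (m : Nat) (a b : Int), (b - a).toNat ≤ m →
      (((PySem.List.pyRange a b s).map (fun p => if x = p then v else 0)).sum) =
        (if x ∈ PySem.List.pyRange a b s then v else 0) := by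
  intro m
  induction m with
  | zero =>
    intro a b h
    rw [pyRange_pos_nil hs (by omega)]; simp
  | succ m ih =>
    intro a b h
    by_cases hab : a < b
    · rw [pyRange_pos_cons hs hab, List.map_cons, List.sum_cons,
        ih (a + s) b (by omega)]
      by_cases hxa : x = a
      · have hnot : x ∉ PySem.List.pyRange (a + s) b s := by
          rw [PySem.List.mem_pyRange_iff_of_pos hs]
          rintro ⟨h1, -, -⟩; omega
        rw [if_pos hxa, if_neg hnot, if_pos (by simp [hxa])]
        ring
      · rw [if_neg hxa]
        have hmem : (x ∈ a :: PySem.List.pyRange (a + s) b s) ↔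
            x ∈ PySem.List.pyRange (a + s) b s := by simp [hxa]
        rw [if_congr hmem rfl rfl]
        ring
    · rw [pyRange_pos_nil hs (by omega)]; simp

lemma sum_ite_mem_pyRange (v x : Int) (a b s : Int) (hs : 0 < s) :
    (((PySem.List.pyRange a b s).map (fun p => if x = p then v else 0)).sum) =
      (if x ∈ PySem.List.pyRange a b s then v else 0) :=
  sum_ite_mem_pyRange_aux v x s hs (b - a).toNat a b le_rfl

-- B's outer sieve loop
lemma foldB_getD (nn : Int) :
    ∀ (L : List Int), (∀ i ∈ L, 0 < i) → ∀ (f : List Int), f.length = nn.toNat →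
      ∀ q : Nat, q < nn.toNat →
      ((L.foldl (fun f i =>
          (PySem.List.pyRange i nn (2 * i)).foldl (fun f m => pvBump f m i) f) f).getD q 0) =
        f.getD q 0 +
          ((L.map (fun i =>
            if (q : Int) ∈ PySem.List.pyRange i nn (2 * i) then i else 0)).sum) := by
  intro L
  induction L with
  | nil => intro _ f _ q _; simp
  | cons x t ih =>
    intro hpos f hlen q hq
    have hx : 0 < x := hpos x List.mem_cons_self
    have hmem : ∀ p ∈ PySem.List.pyRange x nn (2 * x), x ≤ p ∧ p < nn := by
      intro p hp
      rw [PySem.List.mem_pyRange_iff_of_pos (by omega)] at hp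
      exact ⟨hp.1, hp.2.1⟩
    rw [List.foldl_cons, ih (fun i hi => hpos i (List.mem_cons_of_mem _ hi)) _
      (by rw [foldl_length _ (fun f m => bump_length f m x), hlen]) q hq]
    rw [foldPos_getD x _ (fun p hp => by have := hmem p hp; omega) f
      (fun p hp => by have := hmem p hp; rw [hlen]; omega) q]
    rw [sum_ite_mem_pyRange x (q : Int) x nn (2 * x) (by omega)]
    simp only [List.map_cons, List.sum_cons]
    ring

def pvSA (nn m : Int) : Int :=
  ((PySem.List.pyRange 1 nn 2).map (fun i => if i ≤ m ∧ i ∣ m then i else 0)).sum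

def pvSB (nn m : Int) : Int :=
  ((PySem.List.pyRange 1 nn 2).map (fun i =>
    if m ∈ PySem.List.pyRange i nn (2 * i) then i else 0)).sum

lemma odd_dvd_two_mul (i t : Int) (hodd : ¬ 2 ∣ i) : i ∣ 2 * t ↔ i ∣ t := by
  constructor
  · intro h
    have hk : ∃ k, i = 2 * k + 1 := by
      refine ⟨(i - 1) / 2, ?_⟩
      omega
    obtain ⟨k, hk⟩ := hk
    have hco : IsCoprime i 2 := ⟨1, -k, by rw [hk]; ring⟩
    exact hco.dvd_of_dvd_mul_left h
  · intro h; exact Dvd.dvd.mul_left h 2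

lemma pvSB_eq_pvSA (nn q : Int) (hq : q < nn) (hodd : ¬ 2 ∣ q) :
    pvSB nn q = pvSA nn q := by
  unfold pvSB pvSA
  congr 1
  apply List.map_congr_left
  intro i hi
  rw [PySem.List.mem_pyRange_iff_of_pos (by omega : (0:Int) < 2)] at hi
  obtain ⟨hi1, -, hi2⟩ := hi
  have hiodd : ¬ 2 ∣ i := by omega
  have hcond : (q ∈ PySem.List.pyRange i nn (2 * i)) ↔ (i ≤ q ∧ i ∣ q) := by
    rw [PySem.List.mem_pyRange_iff_of_pos (by omega : 0 < 2 * i)]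
    constructor
    · rintro ⟨h1, -, h2⟩
      refine ⟨h1, ?_⟩
      have h3 : i ∣ q - i := dvd_trans ⟨2, by ring⟩ h2
      have h4 : q = (q - i) + i := by ring
      rw [h4]; exact dvd_add h3 (dvd_refl i)
    · rintro ⟨h1, c, hc⟩
      refine ⟨h1, hq, ?_⟩
      have hcodd : ¬ 2 ∣ c := by
        intro ⟨d, hd⟩
        exact hodd ⟨i * d, by rw [hc, hd]; ring⟩
      obtain ⟨d, hd⟩ : ∃ d, c = 2 * d + 1 := ⟨(c - 1) / 2, by omega⟩
      exact ⟨d, by rw [hc, hd]; ring⟩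
  rw [if_congr hcond rfl rfl]

lemma pvSA_even (nn h : Int) (hpos : 1 ≤ h) : pvSA nn (2 * h) = pvSA nn h := by
  unfold pvSA
  congr 1
  apply List.map_congr_left
  intro i hi
  rw [PySem.List.mem_pyRange_iff_of_pos (by omega : (0:Int) < 2)] at hi
  obtain ⟨hi1, -, hi2⟩ := hi
  have hiodd : ¬ 2 ∣ i := by omega
  have hcond : (i ≤ 2 * h ∧ i ∣ 2 * h) ↔ (i ≤ h ∧ i ∣ h) := by
    constructor
    · rintro ⟨-, h2⟩
      have h3 : i ∣ h := (odd_dvd_two_mul i h hiodd).mp h2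
      exact ⟨Int.le_of_dvd (by omega) h3, h3⟩
    · rintro ⟨-, h2⟩
      have h3 : i ∣ 2 * h := (odd_dvd_two_mul i h hiodd).mpr h2
      exact ⟨Int.le_of_dvd (by omega) h3, h3⟩
  rw [if_congr hcond rfl rfl]

lemma pvSA_zero (nn : Int) : pvSA nn 0 = 0 := by
  unfold pvSA
  rw [List.map_congr_left (g := fun _ => (0:Int)) ?_, List.map_const', List.sum_replicate, smul_zero]
  intro i hi
  rw [PySem.List.mem_pyRange_iff_of_pos (by omega : (0:Int) < 2)] at hi
  rw [if_neg]; rintro ⟨h1, -⟩; omega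

lemma pvSB_zero (nn : Int) : pvSB nn 0 = 0 := by
  unfold pvSB
  rw [List.map_congr_left (g := fun _ => (0:Int)) ?_, List.map_const', List.sum_replicate, smul_zero]
  intro i hi
  rw [PySem.List.mem_pyRange_iff_of_pos (by omega : (0:Int) < 2)] at hi
  rw [if_neg]
  intro hmem
  rw [PySem.List.mem_pyRange_iff_of_pos (by omega : 0 < 2 * i)] at hmem
  omega

lemma copy_fold (nn : Int) :
    ∀ (m : Nat) (a : Int), 2 ≤ a → 2 ∣ a → (nn - a).toNat ≤ m →
      ∀ f : List Int, f.length = nn.toNat →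
      (∀ q : Nat, q < nn.toNat → ((q : Int) < a ∨ ¬ 2 ∣ (q : Int)) → f.getD q 0 = pvSA nn q) →
      ∀ q : Nat, q < nn.toNat →
      (((PySem.List.pyRange a nn 2).foldl
          (fun f k => f.set k.toNat (f.getD (PySem.Int.floordiv k 2).toNat 0)) f).getD q 0) =
        pvSA nn (q : Int) := by
  intro m
  induction m with
  | zero =>
    intro a ha2 hdvd hm f hlen hinv q hq
    rw [pyRange_pos_nil (by omega) (by omega)]
    exact hinv q hq (Or.inl (by omega))
  | succ m ih =>
    intro a ha2 hdvd hm f hlen hinv q hq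
    by_cases hab : a < nn
    · rw [pyRange_pos_cons (by omega) hab, List.foldl_cons]
      have hfd : PySem.Int.floordiv a 2 = a / 2 :=
        PySem.Int.floordiv_eq_ediv_of_pos (by omega)
      set f' := f.set a.toNat (f.getD (PySem.Int.floordiv a 2).toNat 0) with hf'
      have hlen' : f'.length = nn.toNat := by rw [hf', List.length_set, hlen]
      apply ih (a + 2) (by omega) (by omega) (by omega) f' hlen' ?_ q hq
      intro q' hq' hcase
      rw [hf', getD_set _ _ _ _ (by omega)]
      by_cases hq'a : q' = a.toNat
      · rw [if_pos hq'a]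
        have hhalf : (PySem.Int.floordiv a 2).toNat < nn.toNat := by rw [hfd]; omega
        rw [hinv _ hhalf (Or.inl (by rw [hfd]; omega))]
        have hcast : ((PySem.Int.floordiv a 2).toNat : Int) = a / 2 := by rw [hfd]; omega
        rw [hcast]
        have : pvSA nn (2 * (a / 2)) = pvSA nn (a / 2) := pvSA_even nn (a / 2) (by omega)
        have ha : 2 * (a / 2) = a := by omega
        rw [ha] at this
        rw [← this, hq'a]
        congr 1
        omega
      · rw [if_neg hq'a]
        exact hinv q' hq' (by omega)
    · rw [pyRange_pos_nil (by omega) (by omega)]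
      exact hinv q hq (Or.inl (by omega))

def pvPS : List Int → Int → List Int
  | [], _ => []
  | v :: r, t => (t + v) :: pvPS r (t + v)

lemma pvPS_length : ∀ (l : List Int) (t : Int), (pvPS l t).length = l.length := by
  intro l
  induction l with
  | nil => intro t; rfl
  | cons v r ih => intro t; simp [pvPS, ih]

lemma pvPS_getD : ∀ (l : List Int) (t : Int) (q : Nat), q < l.length →
    (pvPS l t).getD q 0 = t + (l.take (q + 1)).sum := by
  intro l
  induction l with
  | nil => intro t q hq; simp at hq
  | cons v r ih =>
    intro t q hq
    cases q with
    | zero => simp [pvPS]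
    | succ q =>
      have : (pvPS (v :: r) t).getD (q + 1) 0 = (pvPS r (t + v)).getD q 0 := by
        simp [pvPS]
      rw [this, ih (t + v) q (by simpa using hq)]
      simp [List.take_succ_cons]
      ring

lemma foldAcc : ∀ (l : List Int) (t : Int) (acc : List Int),
    (l.foldl (fun acc v => (acc.1 + v, acc.2 ++ [acc.1 + v])) (t, acc)).2 = acc ++ pvPS l t := by
  intro l
  induction l with
  | nil => intro t acc; simp [pvPS]
  | cons v r ih => intro t acc; rw [List.foldl_cons, ih]; simp [pvPS]

lemma sum_take_getD (l : List Int) (q : Nat) (hq : q < l.length) :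
    (l.take (q + 1)).sum = (l.take q).sum + l.getD q 0 := by
  rw [List.sum_take_succ l q hq, List.getD_eq_getElem _ _ hq]

lemma prefix_fold (nn : Int) (l : List Int) :
    ∀ (m : Nat) (a : Int), 1 ≤ a → (nn - a).toNat ≤ m →
      ∀ f : List Int, f.length = nn.toNat → l.length = nn.toNat →
      (∀ q : Nat, q < nn.toNat →
        (((q : Int) < a → f.getD q 0 = (pvPS l 0).getD q 0) ∧
         (a ≤ (q : Int) → f.getD q 0 = l.getD q 0))) →
      ∀ q : Nat, q < nn.toNat →
      (((PySem.List.pyRange a nn 1).foldl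
          (fun res i => res.set i.toNat (res.getD i.toNat 0 + res.getD (i - 1).toNat 0)) f).getD q 0) =
        (pvPS l 0).getD q 0 := by
  intro m
  induction m with
  | zero =>
    intro a ha hm f hlen hlen2 hinv q hq
    rw [pyRange_pos_nil (by omega) (by omega)]
    exact (hinv q hq).1 (by omega)
  | succ m ih =>
    intro a ha hm f hlen hlen2 hinv q hq
    by_cases hab : a < nn
    · rw [pyRange_pos_cons (by omega) hab, List.foldl_cons]
      set f' := f.set a.toNat (f.getD a.toNat 0 + f.getD (a - 1).toNat 0) with hf'
      have hlen' : f'.length = nn.toNat := by rw [hf', List.length_set, hlen]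
      apply ih (a + 1) (by omega) (by omega) f' hlen' hlen2 ?_ q hq
      intro q' hq'
      constructor
      · intro hq'a
        rw [hf', getD_set _ _ _ _ (by omega)]
        by_cases hcase : q' = a.toNat
        · rw [if_pos hcase]
          have h1 : f.getD a.toNat 0 = l.getD a.toNat 0 := (hinv a.toNat (by omega)).2 (by omega)
          have h2 : f.getD (a - 1).toNat 0 = (pvPS l 0).getD (a - 1).toNat 0 :=
            (hinv (a - 1).toNat (by omega)).1 (by omega)
          rw [h1, h2, pvPS_getD l 0 _ (by omega), pvPS_getD l 0 _ (by omega)]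
          have hidx : (a - 1).toNat + 1 = a.toNat := by omega
          rw [hidx, hcase, sum_take_getD l a.toNat (by omega)]
          ring
        · rw [if_neg hcase]
          exact (hinv q' hq').1 (by omega)
      · intro hq'a
        rw [hf', getD_set _ _ _ _ (by omega)]
        rw [if_neg (by omega)]
        exact (hinv q' hq').2 (by omega)
    · rw [pyRange_pos_nil (by omega) (by omega)]
      exact (hinv q hq).1 (by omega)






lemma mem_oddRange_pos (nn i : Int) (h : i ∈ PySem.List.pyRange 1 nn 2) : 0 < i := by
  rw [PySem.List.mem_pyRange_iff_of_pos (by omega : (0:Int) < 2)] at h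
  omega

lemma sieveA_length (n : Int) : (pvSieveA n).length = (n + 1).toNat := by
  rw [pvSieveA, foldl_length _ (fun f x => innerA_length (n + 1) x 1 f), List.length_replicate]

lemma sieveA_getD (n : Int) (q : Nat) (hq : q < (n + 1).toNat) :
    (pvSieveA n).getD q 0 = pvSA (n + 1) q := by
  rw [pvSieveA, foldA_getD (n + 1) _ (mem_oddRange_pos (n + 1)) _
    (by rw [List.length_replicate]) q hq, getD_replicate, pvSA, zero_add]

lemma sieveB_length (n : Int) : (pvSieveB n).length = (n + 1).toNat := by
  rw [pvSieveB, foldl_length _ (fun f x =>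
    foldl_length (fun f m => pvBump f m x) (fun f m => bump_length f m x) _ f),
    List.length_replicate]

lemma sieveB_getD (n : Int) (q : Nat) (hq : q < (n + 1).toNat) :
    (pvSieveB n).getD q 0 = pvSB (n + 1) q := by
  rw [pvSieveB, foldB_getD (n + 1) _ (mem_oddRange_pos (n + 1)) _
    (by rw [List.length_replicate]) q hq, getD_replicate, pvSB, zero_add]

lemma halveB_length (n : Int) : (pvHalveB n).length = (n + 1).toNat := by
  rw [pvHalveB, foldl_length _ (fun f x => List.length_set), sieveB_length]

lemma halveB_getD (n : Int) (q : Nat) (hq : q < (n + 1).toNat) :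
    (pvHalveB n).getD q 0 = pvSA (n + 1) q := by
  rw [pvHalveB]
  apply copy_fold (n + 1) ((n + 1) - 2).toNat 2 le_rfl ⟨1, rfl⟩ le_rfl _ (sieveB_length n) _ q hq
  intro q' hq' hcase
  rw [sieveB_getD n q' hq']
  by_cases hodd : (2 : Int) ∣ (q' : Int)
  · have hq0 : q' = 0 := by omega
    subst hq0
    rw [Nat.cast_zero, pvSB_zero, pvSA_zero]
  · exact pvSB_eq_pvSA (n + 1) q' (by omega) hodd

lemma halveB_eq_sieveA (n : Int) : pvSieveA n = pvHalveB n := by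
  apply List.ext_getElem (by rw [sieveA_length, halveB_length])
  intro q h1 h2
  rw [← List.getD_eq_getElem _ 0 h1, ← List.getD_eq_getElem _ 0 h2,
    sieveA_getD n q (by rw [← sieveA_length n]; exact h1),
    halveB_getD n q (by rw [← sieveA_length n]; exact h1)]

lemma solve_eq (n : Int) : solve n = solve_alt n := by
  have hlen : (pvSieveA n).length = (n + 1).toNat := sieveA_length n
  have hmain : ∀ q : Nat, q < (n + 1).toNat →
      (solve n).getD q 0 = (pvPS (pvSieveA n) 0).getD q 0 := by
    intro q hq
    rw [solve]
    apply prefix_fold (n + 1) (pvSieveA n) ((n + 1) - 1).toNat 1 le_rfl le_rfl _ hlen hlen _ q hq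
    intro q' hq'
    constructor
    · intro hlt
      have hq0 : q' = 0 := by omega
      subst hq0
      rw [pvPS_getD _ _ _ (by omega), sum_take_getD _ _ (by omega)]
      simp
    · intro _; rfl
  have hlenL : (solve n).length = (n + 1).toNat := by
    rw [solve, foldl_length _ (fun f x => List.length_set), hlen]
  have : solve n = pvPS (pvSieveA n) 0 := by
    apply List.ext_getElem (by rw [hlenL, pvPS_length, hlen])
    intro q h1 h2
    rw [← List.getD_eq_getElem _ 0 h1, ← List.getD_eq_getElem _ 0 h2,
      hmain q (by rw [← hlenL]; exact h1)]
  rw [this, solve_alt, foldAcc, List.nil_append, ← halveB_eq_sieveA]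

-- ===== VERDICT (by name: the statement is the Claim_ definition above) =====
theorem solve_spec : Claim_equal_solve := by
  intro n _
  unfold Spec_solve
  exact solve_eq n
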